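-- pv_equiv track=rewrite | github.com/hksoftcorn/Algorithm | solving/A1208_flatten/sol1.py | solution
-- ===== SOURCE A (Python) =====
-- def solution(dump_limit, boxes):
--     for _ in range(dump_limit):
--         max_idx = min_idx = 0
--         # 가장 큰/작은 박스 찾기
--         for idx in range(len(boxes)):
--             if boxes[idx] > boxes[max_idx]:
--                 max_idx = idx
--             elif boxes[idx] < boxes[min_idx]:
--                 min_idx = idx
--
--         boxes[max_idx] -= 1
--         boxes[min_idx] += 1
--
--         # dump 한 회차가 끝나고 확인하자
--         max_idx = min_idx = 0
--         for idx in range(len(boxes)):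
--             if boxes[idx] > boxes[max_idx]:
--                 max_idx = idx
--             elif boxes[idx] < boxes[min_idx]:
--                 min_idx = idx
--
--         diff = boxes[max_idx] - boxes[min_idx]
--         if diff == 0:
--             return 0
--         elif diff == 1:
--             return 1
--
--     # dump limit 만큼 종료 (다시 찾을 필요 없음 by 김준형)
--     return diff
-- ===== SOURCE B (Python) =====
-- def solution(dump_limit, boxes):
--     # Return-value equivalent to A; does not mutate boxes (A modifies boxes in place).
--     cnt = {}
--     for h in boxes:
--         cnt[h] = cnt.get(h, 0) + 1
--     hi = max(boxes)
--     lo = min(boxes)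
--     for _ in range(dump_limit):
--         if hi - lo <= 1:
--             return hi - lo
--         cnt[hi] -= 1
--         cnt[hi - 1] = cnt.get(hi - 1, 0) + 1
--         if cnt[hi] == 0:
--             hi -= 1
--         cnt[lo] -= 1
--         cnt[lo + 1] = cnt.get(lo + 1, 0) + 1
--         if cnt[lo] == 0:
--             lo += 1
--     return hi - lo
-- ===== Notes on version B (the rewrite author's own statement) =====
-- stated objective: faster
-- what changed: B replaces A's per-dump full rescans of the list with a height histogram (dict) plus tracked max/min updated in O(1) per dump, and stops as soon as the gap is at most 1 (a dump then provably leaves the gap unchanged), so each dump costs O(1) instead of O(n).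
-- crash fix: On dump_limit <= 0 with a nonempty list A raises NameError (the loop never runs and `diff` is unbound); B returns max(boxes) - min(boxes). — e.g. on solution(0, [3, 1]): A raises UnboundLocalError, B returns 2
import Mathlib
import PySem

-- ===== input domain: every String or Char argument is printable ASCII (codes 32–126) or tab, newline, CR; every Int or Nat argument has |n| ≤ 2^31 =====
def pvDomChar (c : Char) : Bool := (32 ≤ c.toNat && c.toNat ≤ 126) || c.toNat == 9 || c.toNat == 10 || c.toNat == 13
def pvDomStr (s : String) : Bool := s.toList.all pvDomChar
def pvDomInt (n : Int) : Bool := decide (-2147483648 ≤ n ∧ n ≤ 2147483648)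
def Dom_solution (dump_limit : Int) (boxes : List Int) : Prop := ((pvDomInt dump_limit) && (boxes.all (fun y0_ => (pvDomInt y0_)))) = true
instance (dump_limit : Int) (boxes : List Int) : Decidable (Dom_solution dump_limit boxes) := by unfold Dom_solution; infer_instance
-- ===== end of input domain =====

-- B replaces A's per-dump O(n) rescans with a height histogram plus tracked max/min updated in
-- O(1) per dump (stopping once the gap is <= 1, which a dump then leaves unchanged); equivalence is
-- about the RETURN value only -- A mutates `boxes` in place, B does not.


-- ===== PORT A =====
-- the inner `for idx in range(len(boxes))` loop of A (run twice per dump), state = (max_idx, min_idx)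
def fmmLoop (bs : List Int) : List Int → Int × Int → Int × Int
  | [], Mm => Mm
  | i :: rest, Mm =>
    if PySem.List.pyGetD bs Mm.1 0 < PySem.List.pyGetD bs i 0 then
      fmmLoop bs rest (i, Mm.2)
    else if PySem.List.pyGetD bs i 0 < PySem.List.pyGetD bs Mm.2 0 then
      fmmLoop bs rest (Mm.1, i)
    else
      fmmLoop bs rest Mm

-- A's outer `for _ in range(dump_limit)` loop; the third argument carries Python's `diff` variable
def solGo : Nat → List Int → Int → Int
  | 0, _, diff => diff
  | Nat.succ n, bs, _ =>
    let P := fmmLoop bs (PySem.List.pyRange 0 (PySem.List.len bs) 1) (0, 0)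
    let bs1 := PySem.List.pySetD bs P.1 (PySem.List.pyGetD bs P.1 0 - 1)
    let bs2 := PySem.List.pySetD bs1 P.2 (PySem.List.pyGetD bs1 P.2 0 + 1)
    let Q := fmmLoop bs2 (PySem.List.pyRange 0 (PySem.List.len bs2) 1) (0, 0)
    let diff := PySem.List.pyGetD bs2 Q.1 0 - PySem.List.pyGetD bs2 Q.2 0
    if diff = 0 then 0 else if diff = 1 then 1 else solGo n bs2 diff

-- the initial 0 stands for Python's unbound `diff` (NameError when dump_limit ≤ 0; excluded by Pre_)
def solution (dump_limit : Int) (boxes : List Int) : Int := solGo dump_limit.toNat boxes 0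

-- ===== PORT B =====
-- B's `for _ in range(dump_limit)` loop, state = (histogram, current max, current min)
def altGo : Nat → PySem.Dict Int Int → Int → Int → Int
  | 0, _, hi, lo => hi - lo
  | Nat.succ n, cnt, hi, lo =>
    if hi - lo ≤ 1 then hi - lo
    else
      let c1 := cnt.insert hi (cnt.getD hi 0 - 1)
      let c2 := c1.insert (hi - 1) (c1.getD (hi - 1) 0 + 1)
      let hi' := if c2.getD hi 0 = 0 then hi - 1 else hi
      let c3 := c2.insert lo (c2.getD lo 0 - 1)
      let c4 := c3.insert (lo + 1) (c3.getD (lo + 1) 0 + 1)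
      let lo' := if c4.getD lo 0 = 0 then lo + 1 else lo
      altGo n c4 hi' lo'

def solution_alt (dump_limit : Int) (boxes : List Int) : Int :=
  let cnt := boxes.foldl (fun c h => PySem.Dict.insert c h (PySem.Dict.getD c h 0 + 1)) PySem.Dict.empty
  let hi := (PySem.List.max? boxes (fun x => x)).getD 0
  let lo := (PySem.List.min? boxes (fun x => x)).getD 0
  altGo dump_limit.toNat cnt hi lo

-- ===== PRECONDITION & SPEC =====
-- Pre_ excludes exactly the inputs where A raises: dump_limit ≤ 0 leaves `diff` unbound (NameError),
-- and an empty list makes boxes[max_idx] raise IndexError (max() also raises ValueError in B there).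
def Pre_solution (dump_limit : Int) (boxes : List Int) : Prop := 1 ≤ dump_limit ∧ boxes ≠ []
instance (dump_limit : Int) (boxes : List Int) : Decidable (Pre_solution dump_limit boxes) := by unfold Pre_solution; infer_instance

def pvWitness_solution : Int × List Int := (2, [5, 1, 3])

-- On dump_limit ≤ 0 with a nonempty list A raises NameError (`diff` is unbound); B returns max(boxes) - min(boxes).
def Raises_solution (dump_limit : Int) (boxes : List Int) : Prop := dump_limit ≤ 0 ∧ boxes ≠ []
instance (dump_limit : Int) (boxes : List Int) : Decidable (Raises_solution dump_limit boxes) := by unfold Raises_solution; infer_instance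
def pvRaiseWitness_solution : Int × List Int := (0, [3, 1])
def pvRaiseWitnessOut_solution : Int := 2

def Spec_solution (dump_limit : Int) (boxes : List Int) (out : Int) : Prop := out = solution_alt dump_limit boxes
instance (dump_limit : Int) (boxes : List Int) (out : Int) : Decidable (Spec_solution dump_limit boxes out) := by unfold Spec_solution; infer_instance

-- ===== CLAIM (what is proved, stated in full; the proofs are below) =====
def Claim_equal_solution : Prop := ∀ (dump_limit : Int) (boxes : List Int), Dom_solution dump_limit boxes → Pre_solution dump_limit boxes → Spec_solution dump_limit boxes (solution dump_limit boxes)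
def Claim_raises_solution : Prop := (∀ (dump_limit : Int) (boxes : List Int), Dom_solution dump_limit boxes → Raises_solution dump_limit boxes → ¬ Pre_solution dump_limit boxes) ∧ (Dom_solution (pvRaiseWitness_solution.1) (pvRaiseWitness_solution.2) ∧ Raises_solution (pvRaiseWitness_solution.1) (pvRaiseWitness_solution.2) ∧ solution_alt (pvRaiseWitness_solution.1) (pvRaiseWitness_solution.2) = pvRaiseWitnessOut_solution)

-- ===== LEMMAS AND PROOFS =====

theorem fmm_const (bs : List Int) (c : Int) (idxs : List Int) (M m : Int)
    (hidx : ∀ i ∈ idxs, PySem.List.pyGetD bs i 0 = c)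
    (hM : PySem.List.pyGetD bs M 0 = c) (hm : PySem.List.pyGetD bs m 0 = c) :
    fmmLoop bs idxs (M, m) = (M, m) := by
  induction idxs with
  | nil => rfl
  | cons i rest ih =>
    have hi := hidx i (by simp)
    simp only [fmmLoop, hi, hM, hm, lt_irrefl, if_false]
    exact ih (fun j hj => hidx j (by simp [hj]))

theorem fmm_inv (bs : List Int) (idxs : List Int) (M m : Int)
    (hidx : ∀ i ∈ idxs, 0 ≤ i ∧ i < (bs.length : Int))
    (hM0 : 0 ≤ M) (hM1 : M < (bs.length : Int)) (hm0 : 0 ≤ m) (hm1 : m < (bs.length : Int))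
    (hle : PySem.List.pyGetD bs m 0 ≤ PySem.List.pyGetD bs M 0) :
    0 ≤ (fmmLoop bs idxs (M, m)).1 ∧ (fmmLoop bs idxs (M, m)).1 < (bs.length : Int) ∧
    0 ≤ (fmmLoop bs idxs (M, m)).2 ∧ (fmmLoop bs idxs (M, m)).2 < (bs.length : Int) ∧
    PySem.List.pyGetD bs (fmmLoop bs idxs (M, m)).2 0 ≤ PySem.List.pyGetD bs (fmmLoop bs idxs (M, m)).1 0 ∧
    PySem.List.pyGetD bs M 0 ≤ PySem.List.pyGetD bs (fmmLoop bs idxs (M, m)).1 0 ∧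
    PySem.List.pyGetD bs (fmmLoop bs idxs (M, m)).2 0 ≤ PySem.List.pyGetD bs m 0 ∧
    ∀ i ∈ idxs, PySem.List.pyGetD bs i 0 ≤ PySem.List.pyGetD bs (fmmLoop bs idxs (M, m)).1 0 ∧
      PySem.List.pyGetD bs (fmmLoop bs idxs (M, m)).2 0 ≤ PySem.List.pyGetD bs i 0 := by
  induction idxs generalizing M m with
  | nil => simp [fmmLoop]; omega
  | cons i rest ih =>
    obtain ⟨hi0, hi1⟩ := hidx i (by simp)
    have hrest : ∀ j ∈ rest, 0 ≤ j ∧ j < (bs.length : Int) := fun j hj => hidx j (by simp [hj])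
    simp only [fmmLoop]
    by_cases h1 : PySem.List.pyGetD bs M 0 < PySem.List.pyGetD bs i 0
    · simp only [h1, if_true]
      obtain ⟨a1, a2, a3, a4, a5, a6, a7, a8⟩ := ih i m hrest hi0 hi1 hm0 hm1 (by omega)
      refine ⟨a1, a2, a3, a4, a5, by omega, a7, ?_⟩
      intro j hj
      rcases List.mem_cons.mp hj with rfl | hj
      · exact ⟨a6, by omega⟩
      · exact a8 j hj
    · simp only [h1, if_false]
      by_cases h2 : PySem.List.pyGetD bs i 0 < PySem.List.pyGetD bs m 0
      · simp only [h2, if_true]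
        obtain ⟨a1, a2, a3, a4, a5, a6, a7, a8⟩ := ih M i hrest hM0 hM1 hi0 hi1 (by omega)
        refine ⟨a1, a2, a3, a4, a5, a6, by omega, ?_⟩
        intro j hj
        rcases List.mem_cons.mp hj with rfl | hj
        · exact ⟨by omega, a7⟩
        · exact a8 j hj
      · simp only [h2, if_false]
        obtain ⟨a1, a2, a3, a4, a5, a6, a7, a8⟩ := ih M m hrest hM0 hM1 hm0 hm1 hle
        refine ⟨a1, a2, a3, a4, a5, a6, a7, ?_⟩
        intro j hj
        rcases List.mem_cons.mp hj with rfl | hj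
        · exact ⟨by omega, by omega⟩
        · exact a8 j hj

theorem fmm_max (bs : List Int) (hne : bs ≠ []) :
    0 ≤ (fmmLoop bs (PySem.List.pyRange 0 (PySem.List.len bs) 1) (0, 0)).1 ∧
    (fmmLoop bs (PySem.List.pyRange 0 (PySem.List.len bs) 1) (0, 0)).1 < (bs.length : Int) ∧
    0 ≤ (fmmLoop bs (PySem.List.pyRange 0 (PySem.List.len bs) 1) (0, 0)).2 ∧
    (fmmLoop bs (PySem.List.pyRange 0 (PySem.List.len bs) 1) (0, 0)).2 < (bs.length : Int) ∧
    PySem.List.pyGetD bs (fmmLoop bs (PySem.List.pyRange 0 (PySem.List.len bs) 1) (0, 0)).1 0 ∈ bs ∧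
    PySem.List.pyGetD bs (fmmLoop bs (PySem.List.pyRange 0 (PySem.List.len bs) 1) (0, 0)).2 0 ∈ bs ∧
    ∀ x ∈ bs, PySem.List.pyGetD bs (fmmLoop bs (PySem.List.pyRange 0 (PySem.List.len bs) 1) (0, 0)).2 0 ≤ x ∧
      x ≤ PySem.List.pyGetD bs (fmmLoop bs (PySem.List.pyRange 0 (PySem.List.len bs) 1) (0, 0)).1 0 := by
  have hlen : 0 < bs.length := List.length_pos_iff.mpr hne
  have hlen' : (0:Int) < (bs.length : Int) := by exact_mod_cast hlen
  rw [PySem.List.len_eq]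
  have hidx : ∀ i ∈ PySem.List.pyRange 0 (bs.length : Int) 1, 0 ≤ i ∧ i < (bs.length : Int) := by
    intro i hi; exact PySem.List.mem_pyRange_one.mp hi
  obtain ⟨a1, a2, a3, a4, a5, a6, a7, a8⟩ :=
    fmm_inv bs (PySem.List.pyRange 0 (bs.length : Int) 1) 0 0 hidx le_rfl hlen' le_rfl hlen' le_rfl
  have hmemM : PySem.List.pyGetD bs (fmmLoop bs (PySem.List.pyRange 0 (↑bs.length) 1) (0, 0)).1 0 ∈ bs := by
    rw [PySem.List.pyGetD_eq_getElem bs 0 a1 a2]; exact List.getElem_mem _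
  have hmemm : PySem.List.pyGetD bs (fmmLoop bs (PySem.List.pyRange 0 (↑bs.length) 1) (0, 0)).2 0 ∈ bs := by
    rw [PySem.List.pyGetD_eq_getElem bs 0 a3 a4]; exact List.getElem_mem _
  refine ⟨a1, a2, a3, a4, hmemM, hmemm, ?_⟩
  intro x hx
  obtain ⟨j, hj, rfl⟩ := List.mem_iff_getElem.mp hx
  have hmem : (j : Int) ∈ PySem.List.pyRange 0 (bs.length : Int) 1 :=
    PySem.List.mem_pyRange_one.mpr ⟨by positivity, by exact_mod_cast hj⟩
  have := a8 _ hmem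
  rw [PySem.List.pyGetD_natCast, List.getD_eq_getElem bs 0 hj] at this
  exact ⟨this.2, this.1⟩

theorem count_set_int (l : List Int) (k : Nat) (hk : k < l.length) (a v : Int) :
    ((l.set k a).count v : Int) = l.count v - (if l[k] = v then 1 else 0) + (if a = v then 1 else 0) := by
  have h := List.count_set (a := a) (b := v) (l := l) (i := k) hk
  have hpos : l[k] = v → 0 < l.count v := fun he => List.count_pos_iff.mpr (he ▸ l.getElem_mem hk)
  simp only [beq_iff_eq] at h
  split_ifs at h ⊢ <;> omega

def dumpA (bs : List Int) : List Int :=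
  let P := fmmLoop bs (PySem.List.pyRange 0 (PySem.List.len bs) 1) (0, 0)
  let bs1 := PySem.List.pySetD bs P.1 (PySem.List.pyGetD bs P.1 0 - 1)
  PySem.List.pySetD bs1 P.2 (PySem.List.pyGetD bs1 P.2 0 + 1)

def diffA (bs : List Int) : Int :=
  let Q := fmmLoop (dumpA bs) (PySem.List.pyRange 0 (PySem.List.len (dumpA bs)) 1) (0, 0)
  PySem.List.pyGetD (dumpA bs) Q.1 0 - PySem.List.pyGetD (dumpA bs) Q.2 0

-- the value-level reading of A's extremum loop: on a list with known max hi' and min lo',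
-- the two looked-up values are exactly hi' and lo'

theorem fmm_vals (bs : List Int) (hi lo : Int) (hne : bs ≠ [])
    (hhi : hi ∈ bs) (hlo : lo ∈ bs) (hbound : ∀ x ∈ bs, lo ≤ x ∧ x ≤ hi) :
    PySem.List.pyGetD bs (fmmLoop bs (PySem.List.pyRange 0 (PySem.List.len bs) 1) (0, 0)).1 0 = hi ∧
    PySem.List.pyGetD bs (fmmLoop bs (PySem.List.pyRange 0 (PySem.List.len bs) 1) (0, 0)).2 0 = lo := by
  obtain ⟨a1, a2, a3, a4, a5, a6, a7⟩ := fmm_max bs hne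
  constructor
  · exact le_antisymm (hbound _ a5).2 (a7 hi hhi).2
  · exact le_antisymm (a7 lo hlo).1 (hbound _ a6).1

theorem dump_counts (bs : List Int) (hi lo : Int) (hne : bs ≠ [])
    (hhi : hi ∈ bs) (hlo : lo ∈ bs) (hbound : ∀ x ∈ bs, lo ≤ x ∧ x ≤ hi) (hlt : lo < hi) :
    (dumpA bs).length = bs.length ∧
    ∀ v : Int, ((dumpA bs).count v : Int) = (bs.count v : Int) - (if v = hi then 1 else 0) +
      (if v = hi - 1 then 1 else 0) - (if v = lo then 1 else 0) + (if v = lo + 1 then 1 else 0) := by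
  obtain ⟨a1, a2, a3, a4, _, _, _⟩ := fmm_max bs hne
  obtain ⟨hPhi, hPlo⟩ := fmm_vals bs hi lo hne hhi hlo hbound
  set P := fmmLoop bs (PySem.List.pyRange 0 (PySem.List.len bs) 1) (0, 0) with hP
  have hlen2 : P.2.toNat < bs.length := by omega
  have hlen1 : P.1.toNat < bs.length := by omega
  have hgM : bs[P.1.toNat] = hi := by rw [← PySem.List.pyGetD_eq_getElem bs 0 a1 a2]; exact hPhi
  have hgm : bs[P.2.toNat] = lo := by rw [← PySem.List.pyGetD_eq_getElem bs 0 a3 a4]; exact hPlo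
  have hne12 : P.1.toNat ≠ P.2.toNat := by
    intro he
    have h1 : bs[P.1.toNat]? = some hi := by rw [List.getElem?_eq_getElem hlen1, hgM]
    have h2 : bs[P.2.toNat]? = some lo := by rw [List.getElem?_eq_getElem hlen2, hgm]
    rw [he, h2] at h1
    simp at h1
    omega
  have hbs1 : PySem.List.pySetD bs P.1 (PySem.List.pyGetD bs P.1 0 - 1) = bs.set P.1.toNat (hi - 1) := by
    rw [PySem.List.pySetD_of_nonneg bs _ a1, hPhi]
  have hbs1len : (bs.set P.1.toNat (hi - 1)).length = bs.length := List.length_set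
  have hget1 : PySem.List.pyGetD (bs.set P.1.toNat (hi - 1)) P.2 0 = lo := by
    rw [PySem.List.pyGetD_eq_getElem _ 0 a3 (by rw [hbs1len]; exact_mod_cast a4)]
    rw [List.getElem_set_ne hne12]
    exact hgm
  have hdump : dumpA bs = (bs.set P.1.toNat (hi - 1)).set P.2.toNat (lo + 1) := by
    simp only [dumpA]
    rw [← hP, hbs1, hget1, PySem.List.pySetD_of_nonneg _ _ a3]
  rw [hdump]
  constructor
  · simp
  · intro v
    rw [count_set_int _ _ (by rw [hbs1len]; exact hlen2) _ v,
        List.getElem_set_ne hne12, hgm,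
        count_set_int _ _ hlen1 _ v, hgM]
    split_ifs <;> omega

def InvBH (cnt : PySem.Dict Int Int) (hi lo : Int) (bs : List Int) : Prop :=
  (∀ v : Int, cnt.getD v 0 = (bs.count v : Int)) ∧ hi ∈ bs ∧ lo ∈ bs ∧ ∀ x ∈ bs, lo ≤ x ∧ x ≤ hi

theorem solGo_succ (n : Nat) (bs : List Int) (d : Int) :
    solGo (n + 1) bs d = if diffA bs = 0 then 0 else if diffA bs = 1 then 1
      else solGo n (dumpA bs) (diffA bs) := rfl

theorem altGo_le_one (n : Nat) (cnt : PySem.Dict Int Int) (hi lo : Int) (h : hi - lo ≤ 1) :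
    altGo n cnt hi lo = hi - lo := by
  cases n <;> simp [altGo, h]

theorem dumpA_const (bs : List Int) (c : Int) (hne : bs ≠ []) (hall : ∀ x ∈ bs, x = c) :
    dumpA bs = bs := by
  have hlen : 0 < bs.length := List.length_pos_iff.mpr hne
  have hg : ∀ i : Int, 0 ≤ i → i < (bs.length : Int) → PySem.List.pyGetD bs i 0 = c := by
    intro i h0 h1
    rw [PySem.List.pyGetD_eq_getElem bs 0 h0 h1]
    exact hall _ (List.getElem_mem _)
  have hP : fmmLoop bs (PySem.List.pyRange 0 (PySem.List.len bs) 1) (0, 0) = (0, 0) := by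
    apply fmm_const bs c
    · intro i hi
      rw [PySem.List.len_eq] at hi
      obtain ⟨h0, h1⟩ := PySem.List.mem_pyRange_one.mp hi
      exact hg i h0 h1
    · exact hg 0 le_rfl (by exact_mod_cast hlen)
    · exact hg 0 le_rfl (by exact_mod_cast hlen)
  have hbs0 : bs[0] = c := hall _ (List.getElem_mem hlen)
  simp only [dumpA, hP]
  rw [PySem.List.pySetD_of_nonneg _ _ le_rfl, hg 0 le_rfl (by exact_mod_cast hlen)]
  have hlen1 : (bs.set (0:Int).toNat (c - 1)).length = bs.length := List.length_set
  rw [PySem.List.pySetD_of_nonneg _ _ le_rfl,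
      PySem.List.pyGetD_eq_getElem _ 0 le_rfl (by rw [hlen1]; exact_mod_cast hlen)]
  have : (bs.set (0:Int).toNat (c-1))[(0:Int).toNat] = c - 1 :=
    List.getElem_set_self (by rw [hlen1]; exact hlen)
  rw [this, List.set_set]
  rw [show c - 1 + 1 = c from by ring, ← hbs0]
  exact List.set_getElem_self hlen

theorem main_lemma (n : Nat) (bs : List Int) (cnt : PySem.Dict Int Int) (hi lo : Int)
    (hne : bs ≠ []) (hinv : InvBH cnt hi lo bs) :
    solGo n bs (hi - lo) = altGo n cnt hi lo := by
  induction n generalizing bs cnt hi lo with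
  | zero => rfl
  | succ n ih =>
    obtain ⟨hcnt, hhi, hlo, hbound⟩ := hinv
    have hlohi : lo ≤ hi := (hbound hi hhi).1
    rw [solGo_succ]
    by_cases hd : hi - lo ≤ 1
    · rw [altGo_le_one _ _ _ _ hd]
      by_cases heq : hi = lo
      · have hall : ∀ x ∈ bs, x = lo :=
          fun x hx => le_antisymm ((hbound x hx).2.trans (le_of_eq heq)) (hbound x hx).1
        have hdump := dumpA_const bs lo hne hall
        have hlo' : lo ∈ bs := heq ▸ hhi
        obtain ⟨e1, e2⟩ := fmm_vals bs lo lo hne hlo' hlo'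
          (fun x hx => ⟨(hall x hx).ge, (hall x hx).le⟩)
        have hdiff : diffA bs = 0 := by
          simp only [diffA, hdump]; rw [e1, e2]; omega
        rw [hdiff]
        simp; omega
      · have hd1 : hi - lo = 1 := by omega
        have hlt : lo < hi := by omega
        obtain ⟨hlen2, hcount2⟩ := dump_counts bs hi lo hne hhi hlo hbound hlt
        have hcnt_eq : ∀ v, (dumpA bs).count v = bs.count v := by
          intro v; have := hcount2 v; split_ifs at this <;> omega
        have hmem_iff : ∀ x, x ∈ dumpA bs ↔ x ∈ bs := by
          intro x; rw [← List.count_pos_iff, ← List.count_pos_iff, hcnt_eq]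
        have hne2 : dumpA bs ≠ [] := by
          intro h
          rw [h] at hlen2
          exact hne (List.eq_nil_of_length_eq_zero hlen2.symm)
        obtain ⟨e1, e2⟩ := fmm_vals (dumpA bs) hi lo hne2 ((hmem_iff hi).mpr hhi)
          ((hmem_iff lo).mpr hlo) (fun x hx => hbound x ((hmem_iff x).mp hx))
        have hdiff : diffA bs = 1 := by
          simp only [diffA]; rw [e1, e2]; omega
        rw [hdiff]
        simp; omega
    · -- hi - lo ≥ 2
      have hlt : lo < hi := by omega
      obtain ⟨hlen2, hcount2⟩ := dump_counts bs hi lo hne hhi hlo hbound hlt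
      have hne2 : dumpA bs ≠ [] := by
        intro h
        rw [h] at hlen2
        exact hne (List.eq_nil_of_length_eq_zero hlen2.symm)
      have hmemcase : ∀ x ∈ dumpA bs, x ∈ bs ∨ x = hi - 1 ∨ x = lo + 1 := by
        intro x hx
        by_cases h1 : x = hi - 1
        · exact Or.inr (Or.inl h1)
        by_cases h2 : x = lo + 1
        · exact Or.inr (Or.inr h2)
        left
        have hpos : 0 < (dumpA bs).count x := List.count_pos_iff.mpr hx
        have := hcount2 x
        rw [← List.count_pos_iff (a := x) (l := bs)]
        split_ifs at this <;> omega
      have hcbs2hi : ((dumpA bs).count hi : Int) = (bs.count hi : Int) - 1 := by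
        have := hcount2 hi; split_ifs at this <;> omega
      have hcbs2lo : ((dumpA bs).count lo : Int) = (bs.count lo : Int) - 1 := by
        have := hcount2 lo; split_ifs at this <;> omega
      -- B-side step, named
      simp only [altGo]
      rw [if_neg hd]
      set c1 := cnt.insert hi (cnt.getD hi 0 - 1) with hc1
      set c2 := c1.insert (hi - 1) (c1.getD (hi - 1) 0 + 1) with hc2
      set c3 := c2.insert lo (c2.getD lo 0 - 1) with hc3
      set c4 := c3.insert (lo + 1) (c3.getD (lo + 1) 0 + 1) with hc4
      have g4 : ∀ v : Int, c4.getD v 0 = ((dumpA bs).count v : Int) := by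
        intro v
        rw [hcount2 v]
        simp only [hc4, hc3, hc2, hc1, PySem.Dict.getD_insert, hcnt]
        split_ifs <;> first | omega | simp_all
      have ghi : c2.getD hi 0 = ((dumpA bs).count hi : Int) := by
        rw [hcbs2hi]
        simp only [hc2, hc1, PySem.Dict.getD_insert, hcnt]
        split_ifs <;> omega
      have glo : c4.getD lo 0 = ((dumpA bs).count lo : Int) := by
        rw [hcbs2lo]
        simp only [hc4, hc3, hc2, hc1, PySem.Dict.getD_insert, hcnt]
        split_ifs <;> omega
      set hi' := if c2.getD hi 0 = 0 then hi - 1 else hi with hhi'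
      set lo' := if c4.getD lo 0 = 0 then lo + 1 else lo with hlo'
      -- new invariant facts
      have hhibs1 : 0 < bs.count hi := List.count_pos_iff.mpr hhi
      have hlobs1 : 0 < bs.count lo := List.count_pos_iff.mpr hlo
      have hup : ∀ x ∈ dumpA bs, x ≤ hi' := by
        intro x hx
        have hb : x ≤ hi := by
          rcases hmemcase x hx with h | h | h
          · exact (hbound x h).2
          · omega
          · omega
        rw [hhi']
        split_ifs with h0
        · rw [ghi] at h0
          have : x ≠ hi := by
            intro he
            have : 0 < (dumpA bs).count x := List.count_pos_iff.mpr hx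
            rw [he] at this; omega
          omega
        · exact hb
      have hdown : ∀ x ∈ dumpA bs, lo' ≤ x := by
        intro x hx
        have hb : lo ≤ x := by
          rcases hmemcase x hx with h | h | h
          · exact (hbound x h).1
          · omega
          · omega
        rw [hlo']
        split_ifs with h0
        · rw [glo] at h0
          have : x ≠ lo := by
            intro he
            have : 0 < (dumpA bs).count x := List.count_pos_iff.mpr hx
            rw [he] at this; omega
          omega
        · exact hb
      have hhimem : hi' ∈ dumpA bs := by
        rw [hhi']
        split_ifs with h0
        · apply List.count_pos_iff.mp
          have := hcount2 (hi - 1)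
          split_ifs at this <;> omega
        · apply List.count_pos_iff.mp
          rw [ghi] at h0
          omega
      have hlomem : lo' ∈ dumpA bs := by
        rw [hlo']
        split_ifs with h0
        · apply List.count_pos_iff.mp
          have := hcount2 (lo + 1)
          split_ifs at this <;> omega
        · apply List.count_pos_iff.mp
          rw [glo] at h0
          omega
      obtain ⟨e1, e2⟩ := fmm_vals (dumpA bs) hi' lo' hne2 hhimem hlomem
        (fun x hx => ⟨hdown x hx, hup x hx⟩)
      have hdiff : diffA bs = hi' - lo' := by
        simp only [diffA]; rw [e1, e2]
      rw [hdiff]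
      by_cases hz : hi' - lo' = 0
      · rw [if_pos hz, altGo_le_one _ _ _ _ (by omega)]; omega
      rw [if_neg hz]
      by_cases ho : hi' - lo' = 1
      · rw [if_pos ho, altGo_le_one _ _ _ _ (by omega)]; omega
      rw [if_neg ho]
      exact ih (dumpA bs) c4 hi' lo' hne2
        ⟨g4, hhimem, hlomem, fun x hx => ⟨hdown x hx, hup x hx⟩⟩

theorem solution_eq (dump_limit : Int) (boxes : List Int) (hdl : 1 ≤ dump_limit) (hne : boxes ≠ []) :
    solution dump_limit boxes = solution_alt dump_limit boxes := by
  obtain ⟨hi, hhi⟩ : ∃ hi, PySem.List.max? boxes (fun x => x) = some hi := by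
    cases h : PySem.List.max? boxes (fun x => x) with
    | none => exact absurd ((PySem.List.max?_eq_none_iff _ _).mp h) hne
    | some m => exact ⟨m, rfl⟩
  obtain ⟨lo, hlo⟩ : ∃ lo, PySem.List.min? boxes (fun x => x) = some lo := by
    cases h : PySem.List.min? boxes (fun x => x) with
    | none => exact absurd ((PySem.List.min?_eq_none_iff _ _).mp h) hne
    | some m => exact ⟨m, rfl⟩
  obtain ⟨k, hk⟩ : ∃ k, dump_limit.toNat = k + 1 := ⟨dump_limit.toNat - 1, by omega⟩
  unfold solution solution_alt
  rw [hk, hhi, hlo]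
  simp only [Option.getD_some]
  have hgo : solGo (k + 1) boxes 0 = solGo (k + 1) boxes (hi - lo) := rfl
  rw [hgo]
  apply main_lemma (k + 1) boxes _ hi lo hne
  refine ⟨?_, PySem.List.max?_mem hhi, PySem.List.min?_mem hlo,
    fun x hx => ⟨PySem.List.min?_isMin hlo x hx, PySem.List.max?_isMax hhi x hx⟩⟩
  intro v
  rw [PySem.Dict.getD_foldl_insert_add_one]
  simp [PySem.Dict.getD_empty]

-- ===== VERDICT (by name: the statement is the Claim_ definition above) =====
theorem solution_spec : Claim_equal_solution :=
  fun dump_limit boxes _ hpre => solution_eq dump_limit boxes hpre.1 hpre.2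

@[simp] theorem solution_raises : Claim_raises_solution := by
  unfold Claim_raises_solution
  exact ⟨fun dl bs _ hr hp => absurd hp (by unfold Pre_solution Raises_solution at *; omega), by decide⟩
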